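-- pv_equiv track=rewrite | github.com/Jodyannre/python-adventjs-challenge-2024 | challenge019/main.py | distribute_weight
-- ===== SOURCE A (Python) =====
-- def distribute_weight(weight: int) -> str:
--     if weight <= 0: return ""
--     x = weight
--     result = ""
--     acc_box = ""
--     acc_size = None
--     prev_size = None
--     while x > 0:
--         if x >= 10:
--             x -= 10
--             prev_size = acc_size
--             acc_size = 9
--         elif 5 <= x < 10:
--             x -= 5
--             prev_size = acc_size
--             acc_size = 5
--         elif 2 <= x < 5:
--             x -= 2
--             prev_size = acc_size
--             acc_size = 3
--         else:
--             prev_size = acc_size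
--             x -= 1
--             acc_size = 1
--
--         if acc_size >= 5:
--             acc_box += "|" + " " * acc_size + "|" + "\n"
--         if not prev_size:
--             acc_box += "|" + "_" * acc_size + "|"
--         else:
--             next = 0 if prev_size==acc_size else prev_size-(acc_size+1)
--             acc_box += "|" + "_" * acc_size + "|"+ "_" * (next) + "\n"
--
--         result = acc_box + result
--         acc_box = ""
--
--     result = " " + "_" * acc_size + " " + "\n" + result
--     return result
-- ===== SOURCE B (Python) =====
-- TABLE = {0: [], 1: [1], 2: [3], 3: [3, 1], 4: [3, 3], 5: [5],
--          6: [5, 1], 7: [5, 3], 8: [5, 3, 1], 9: [5, 3, 3]}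
--
-- def distribute_weight(weight: int) -> str:
--     if weight <= 0:
--         return ""
--     # closed-form decomposition: the greedy loop always takes weight//10 nines,
--     # then a fixed pattern determined by weight % 10
--     sizes = [9] * (weight // 10) + TABLE[weight % 10]
--     parts = []
--     prev = None
--     for s in sizes:
--         chunk = ""
--         if s >= 5:
--             chunk += "|" + " " * s + "|\n"
--         if prev is None:
--             chunk += "|" + "_" * s + "|"
--         else:
--             ext = 0 if prev == s else prev - (s + 1)
--             chunk += "|" + "_" * s + "|" + "_" * ext + "\n"
--         parts.append(chunk)
--         prev = s
--     return " " + "_" * sizes[-1] + " \n" + "".join(reversed(parts))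
-- ===== Notes on version B (the rewrite author's own statement) =====
-- stated objective: faster
-- what changed: Replaces A's greedy while-loop, which prepends each chunk to the whole result string (quadratic concatenation), with a closed form (weight//10 nines plus a 10-entry table for weight%10) and a single rendering pass joined once at the end.
import Mathlib
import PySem

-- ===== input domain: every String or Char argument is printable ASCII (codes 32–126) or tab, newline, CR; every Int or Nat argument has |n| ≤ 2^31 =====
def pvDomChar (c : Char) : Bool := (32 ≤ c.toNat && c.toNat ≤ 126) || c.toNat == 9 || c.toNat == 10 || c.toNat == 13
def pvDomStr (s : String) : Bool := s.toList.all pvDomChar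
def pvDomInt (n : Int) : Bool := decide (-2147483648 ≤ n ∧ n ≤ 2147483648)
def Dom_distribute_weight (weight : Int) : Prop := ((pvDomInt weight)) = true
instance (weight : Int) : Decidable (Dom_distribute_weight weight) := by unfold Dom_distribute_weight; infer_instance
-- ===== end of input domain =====

-- B replaces A's greedy subtraction loop by a closed form (weight//10 nines plus a
-- 10-entry table for weight%10) and a single rendering pass (objective: faster loop structure).

-- ===== PORT A =====
-- acc_box built inside one loop iteration (the two ifs, in A's order)
def pvBoxA (prev_size : Option Int) (acc_size : Int) : List Char :=
  (if acc_size ≥ 5 then '|' :: (List.replicate acc_size.toNat ' ' ++ ['|', '\n']) else [])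
  ++ (match prev_size with
      | none => '|' :: (List.replicate acc_size.toNat '_' ++ ['|'])   -- 'not prev_size': None ...
      | some p =>
        if p = 0 then '|' :: (List.replicate acc_size.toNat '_' ++ ['|'])   -- ... or 0 is falsy too
        else
          let nxt : Int := if p = acc_size then 0 else p - (acc_size + 1)
          '|' :: (List.replicate acc_size.toNat '_' ++ ['|'] ++ List.replicate nxt.toNat '_' ++ ['\n']))

-- the while loop; returns (result, final acc_size)
def pvLoopA (x : Int) (acc_size : Option Int) (result : List Char) : List Char × Option Int :=
  if _hx : 0 < x then
    let step : Int × Int :=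
      if 10 ≤ x then (x - 10, 9)
      else if 5 ≤ x ∧ x < 10 then (x - 5, 5)
      else if 2 ≤ x ∧ x < 5 then (x - 2, 3)
      else (x - 1, 1)
    pvLoopA step.1 (some step.2) (pvBoxA acc_size step.2 ++ result)
  else (result, acc_size)
termination_by x.toNat
decreasing_by
  split_ifs <;> simp <;> omega

def distribute_weight (weight : Int) : String :=
  if weight ≤ 0 then ""
  else
    let r := pvLoopA weight none []
    -- r.2 is always 'some' here (the loop runs at least once); getD 0 is never consulted
    String.mk (' ' :: (List.replicate (r.2.getD 0).toNat '_' ++ [' ', '\n'] ++ r.1))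

-- ===== PORT B =====
def pvTableB (r : Int) : List Int :=
  if r = 0 then [] else if r = 1 then [1] else if r = 2 then [3]
  else if r = 3 then [3, 1] else if r = 4 then [3, 3] else if r = 5 then [5]
  else if r = 6 then [5, 1] else if r = 7 then [5, 3] else if r = 8 then [5, 3, 1]
  else [5, 3, 3]

-- one loop body of B's rendering pass: the chunk for size s after previous size prev
def pvBoxB (prev : Option Int) (s : Int) : List Char :=
  (if s ≥ 5 then '|' :: (List.replicate s.toNat ' ' ++ ['|', '\n']) else [])
  ++ (match prev with
      | none => '|' :: (List.replicate s.toNat '_' ++ ['|'])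
      | some p =>
        let ext : Int := if p = s then 0 else p - (s + 1)
        '|' :: (List.replicate s.toNat '_' ++ ['|'] ++ List.replicate ext.toNat '_' ++ ['\n']))

def distribute_weight_alt (weight : Int) : String :=
  if weight ≤ 0 then ""
  else
    let sizes : List Int :=
      PySem.List.pyRepeat [(9 : Int)] (PySem.Int.floordiv weight 10)
        ++ pvTableB (PySem.Int.mod weight 10)
    -- the for-loop: parts list plus the carried previous size
    let fin := sizes.foldl
      (fun (st : List (List Char) × Option Int) s => (st.1 ++ [pvBoxB st.2 s], some s))
      ([], none)
    -- "".join(reversed(parts)) = concatenation of parts back to front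
    String.mk (' ' :: (List.replicate ((PySem.List.pyGet? sizes (-1)).getD 0).toNat '_'
      ++ [' ', '\n'] ++ (fin.1.reverse).flatten))

-- ===== PRECONDITION & SPEC =====
def Spec_distribute_weight (weight : Int) (out : String) : Prop := out = distribute_weight_alt weight
instance (weight : Int) (out : String) : Decidable (Spec_distribute_weight weight out) := by unfold Spec_distribute_weight; infer_instance

-- ===== CLAIM (what is proved, stated in full; the proofs are below) =====
def Claim_equal_distribute_weight : Prop := ∀ (weight : Int), Dom_distribute_weight weight → Spec_distribute_weight weight (distribute_weight weight)

-- ===== LEMMAS AND PROOFS =====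

-- the box sizes A's greedy loop produces, in production order
def pvGSizes (x : Int) : List Int :=
  if _hx : 0 < x then
    if 10 ≤ x then 9 :: pvGSizes (x - 10)
    else if 5 ≤ x then 5 :: pvGSizes (x - 5)
    else if 2 ≤ x then 3 :: pvGSizes (x - 2)
    else 1 :: pvGSizes (x - 1)
  else []
termination_by x.toNat
decreasing_by all_goals omega

-- the chunks of a size list, rendered back to front
def pvChunksRev (prev : Option Int) : List Int → List Char
  | [] => []
  | s :: rest => pvChunksRev (some s) rest ++ pvBoxB prev s

-- the last size (prev if the list is empty)
def pvLastO (prev : Option Int) : List Int → Option Int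
  | [] => prev
  | s :: rest => pvLastO (some s) rest

theorem pvBox_eq (prev : Option Int) (s : Int) (h : prev ≠ some 0) :
    pvBoxA prev s = pvBoxB prev s := by
  cases prev with
  | none => rfl
  | some p =>
    have hp : p ≠ 0 := by intro h0; exact h (by rw [h0])
    simp [pvBoxA, pvBoxB, hp]

theorem pvLoopA_eq_aux (n : Nat) : ∀ (x : Int), x.toNat ≤ n → ∀ (prev : Option Int) (result : List Char), prev ≠ some 0 →
    pvLoopA x prev result = (pvChunksRev prev (pvGSizes x) ++ result, pvLastO prev (pvGSizes x)) := by
  induction n with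
  | zero =>
    intro x hx prev result h
    have hnp : ¬ 0 < x := by omega
    rw [pvLoopA, pvGSizes]
    simp [hnp, pvChunksRev, pvLastO]
  | succ n ih =>
    intro x hx prev result h
    by_cases hp : 0 < x
    · rw [pvLoopA, pvGSizes]
      simp only [hp, dif_pos]
      split_ifs <;>
        first
          | (exfalso; omega)
          | (rw [ih _ (by omega) _ _ (by simp), pvChunksRev, pvLastO, pvBox_eq _ _ h]
             simp [List.append_assoc])
    · rw [pvLoopA, pvGSizes]
      simp [hp, pvChunksRev, pvLastO]

theorem pvLoopA_eq (x : Int) (prev : Option Int) (result : List Char)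
    (h : prev ≠ some 0) :
    pvLoopA x prev result = (pvChunksRev prev (pvGSizes x) ++ result, pvLastO prev (pvGSizes x)) :=
  pvLoopA_eq_aux x.toNat x le_rfl prev result h

-- pvGSizes on the ten small remainders
theorem pvGS0 : pvGSizes 0 = [] := by rw [pvGSizes]; norm_num
theorem pvGS1 : pvGSizes 1 = [1] := by rw [pvGSizes]; norm_num [pvGS0]
theorem pvGS2 : pvGSizes 2 = [3] := by rw [pvGSizes]; norm_num [pvGS0]
theorem pvGS3 : pvGSizes 3 = [3, 1] := by rw [pvGSizes]; norm_num [pvGS1]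
theorem pvGS4 : pvGSizes 4 = [3, 3] := by rw [pvGSizes]; norm_num [pvGS2]
theorem pvGS5 : pvGSizes 5 = [5] := by rw [pvGSizes]; norm_num [pvGS0]
theorem pvGS6 : pvGSizes 6 = [5, 1] := by rw [pvGSizes]; norm_num [pvGS1]
theorem pvGS7 : pvGSizes 7 = [5, 3] := by rw [pvGSizes]; norm_num [pvGS2]
theorem pvGS8 : pvGSizes 8 = [5, 3, 1] := by rw [pvGSizes]; norm_num [pvGS3]
theorem pvGS9 : pvGSizes 9 = [5, 3, 3] := by rw [pvGSizes]; norm_num [pvGS4]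

theorem pvGSizes_closed_aux (n : Nat) : ∀ (x : Int), x.toNat ≤ n → 0 < x →
    pvGSizes x = PySem.List.pyRepeat [(9 : Int)] (PySem.Int.floordiv x 10)
      ++ pvTableB (PySem.Int.mod x 10) := by
  induction n with
  | zero => intro x hx hp; omega
  | succ n ih =>
    intro x hx hp
    rw [PySem.List.pyRepeat_singleton, PySem.Int.floordiv_eq_ediv_of_pos (by norm_num),
        PySem.Int.mod_eq_emod_of_pos (by norm_num)]
    by_cases h10 : 10 ≤ x
    · have hdiv : x / 10 = (x - 10) / 10 + 1 := by omega
      have hnn : 0 ≤ (x - 10) / 10 := by omega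
      have hmod : x % 10 = (x - 10) % 10 := by omega
      have htn : (x / 10).toNat = ((x - 10) / 10).toNat + 1 := by omega
      rw [pvGSizes]
      simp only [hp, dif_pos, h10, if_pos]
      by_cases hz : 0 < x - 10
      · rw [ih _ (by omega) hz, PySem.List.pyRepeat_singleton,
            PySem.Int.floordiv_eq_ediv_of_pos (by norm_num),
            PySem.Int.mod_eq_emod_of_pos (by norm_num), htn, hmod]
        simp [List.replicate_succ]
      · have hx10 : x = 10 := by omega
        subst hx10
        norm_num [pvGS0, pvTableB]
    · have hd : x / 10 = 0 := by omega
      have hm : x % 10 = x := by omega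
      rw [hd, hm]
      have hx9 : x ≤ 9 := by omega
      interval_cases x <;>
        simp [pvGS1, pvGS2, pvGS3, pvGS4, pvGS5, pvGS6, pvGS7, pvGS8, pvGS9, pvTableB]

theorem pvGSizes_closed (x : Int) (hx : 0 < x) :
    pvGSizes x = PySem.List.pyRepeat [(9 : Int)] (PySem.Int.floordiv x 10)
      ++ pvTableB (PySem.Int.mod x 10) :=
  pvGSizes_closed_aux x.toNat x le_rfl hx

theorem pvFold_parts (sizes : List Int) (parts : List (List Char)) (prev : Option Int) :
    ((sizes.foldl
      (fun (st : List (List Char) × Option Int) s => (st.1 ++ [pvBoxB st.2 s], some s))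
      (parts, prev)).1.reverse).flatten
    = pvChunksRev prev sizes ++ (parts.reverse).flatten := by
  induction sizes generalizing parts prev with
  | nil => simp [pvChunksRev]
  | cons s rest ih =>
    simp only [List.foldl_cons]
    rw [ih, pvChunksRev]
    simp

theorem pvLastO_getLast (l : List Int) (prev : Option Int) (h : l ≠ []) :
    pvLastO prev l = l.getLast? := by
  induction l generalizing prev with
  | nil => exact absurd rfl h
  | cons s rest ih =>
    cases rest with
    | nil => simp [pvLastO]
    | cons b t =>
      rw [pvLastO, ih _ (by simp)]
      simp [List.getLast?_cons_cons]

theorem pvGSizes_ne_nil (x : Int) (hx : 0 < x) : pvGSizes x ≠ [] := by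
  rw [pvGSizes]
  split_ifs <;> simp_all

-- ===== VERDICT (by name: the statement is the Claim_ definition above) =====
theorem distribute_weight_spec : Claim_equal_distribute_weight := by
  intro weight _
  unfold Spec_distribute_weight distribute_weight distribute_weight_alt
  by_cases hw : weight ≤ 0
  · simp [hw]
  · have hpos : 0 < weight := by omega
    simp only [hw, if_false]
    rw [pvLoopA_eq _ _ _ (by simp), ← pvGSizes_closed _ hpos, pvFold_parts]
    rw [pvLastO_getLast _ _ (pvGSizes_ne_nil _ hpos), PySem.List.pyGet?_neg_one]
    simp
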